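-- pv_equiv track=rewrite | github.com/sprwoo/Math-Undergraduate-Calendar | Scrapers/mainscraper.py | requirement_dict
-- ===== SOURCE A (Python) =====
-- def requirement_dict(lines: str) -> dict:
--     '''Takes the string of requirements and turns it into a dictionary with the headers as keys and courses as values'''
--     organized_data = {}
--     valid_keys = ["One ", "Two ", "Three ", "Four ", "Five ", "Six ", "All ", "Elective", "Any", "following",
--                   "minimum", "academic standing", "courses", "offers"] # All of the potential headers (Don't mind that last one, CPA wants to be special)
--     count = 1 # Keep track of the numbers
--     key = None
--     string = ""
--     for letter in lines:
--         if letter == '\r' or letter == '\n':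
--             string = string.strip()
--             if string:
--                 if any(valid_key in string for valid_key in valid_keys):
--                     key = f'{count}. {string}'
--                     count += 1
--                     organized_data[key] = []
--                 elif (key): # If a key is not found, just append it into the dictionary as a value
--                     organized_data[key].append(string)
--                 else:
--                     organized_data[f"{count}."] = string
--                     count += 1
--             string = ""
--         elif(letter == "\'"):
--             continue
--         else:
--             string += letter
--
--     if string.strip():
--         key = f"{count}. {string}"
--         organized_data[key] = []
--     return organized_data
-- ===== SOURCE B (Python) =====
-- def requirement_dict(lines: str) -> dict:
--     '''Takes the string of requirements and turns it into a dictionary with the headers as keys and courses as values'''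
--     valid_keys = ["One ", "Two ", "Three ", "Four ", "Five ", "Six ", "All ", "Elective", "Any", "following",
--                   "minimum", "academic standing", "courses", "offers"]
--
--     def is_header(s):
--         return any(k in s for k in valid_keys)
--
--     segments = lines.replace("'", "").replace("\r", "\n").split("\n")
--     body = [s for s in (seg.strip() for seg in segments[:-1]) if s]
--
--     organized_data = {}
--     count = 1
--     i = 0
--     # leading segments before the first header become standalone numbered entries
--     while i < len(body) and not is_header(body[i]):
--         organized_data[f'{count}.'] = body[i]
--         count += 1
--         i += 1
--     # each header takes the run of non-header segments after it as its course list
--     while i < len(body):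
--         header = f'{count}. {body[i]}'
--         count += 1
--         i += 1
--         courses = []
--         while i < len(body) and not is_header(body[i]):
--             courses.append(body[i])
--             i += 1
--         organized_data[header] = courses
--     if segments[-1].strip():
--         organized_data[f'{count}. {segments[-1]}'] = []
--     return organized_data
-- ===== Notes on version B (the rewrite author's own statement) =====
-- stated objective: faster
-- what changed: B replaces A's character-by-character loop that grows an accumulator string with staged passes: strip apostrophes and split into line segments up front, strip/filter the body segments once into a list, then group each header with the run of non-header segments after it (leading non-headers become standalone entries); the final segment keeps A's trailing branch.
-- outside the precondition, e.g. on requirement_dict('abc\n'): A returns {'1.': 'abc'}, B returns {'1.': 'abc'}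
import Mathlib
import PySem

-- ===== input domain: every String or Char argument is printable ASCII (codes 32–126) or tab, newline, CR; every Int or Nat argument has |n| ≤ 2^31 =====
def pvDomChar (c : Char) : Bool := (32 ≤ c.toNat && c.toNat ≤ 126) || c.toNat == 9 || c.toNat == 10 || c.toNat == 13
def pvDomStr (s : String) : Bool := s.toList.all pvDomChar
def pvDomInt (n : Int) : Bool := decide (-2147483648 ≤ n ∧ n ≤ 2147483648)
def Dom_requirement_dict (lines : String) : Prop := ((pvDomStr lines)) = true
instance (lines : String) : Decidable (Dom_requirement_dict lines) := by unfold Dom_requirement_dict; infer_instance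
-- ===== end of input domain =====

-- B replaces A's character-by-character accumulator loop with staged passes: clean + split the
-- text, strip/filter the body segments once, then group each header with the run of courses
-- after it (objective: simpler decomposition; measurably faster only if a timing run says so).

-- shared constant: the valid_keys list both Pythons write out literally
def pvValidKeys : List (List Char) :=
  ["One ", "Two ", "Three ", "Four ", "Five ", "Six ", "All ", "Elective", "Any", "following",
   "minimum", "academic standing", "courses", "offers"].map String.toList

-- ===== PORT A =====
-- state: (organized_data, count, key, string); one step of A's `for letter in lines` loop.
-- In the `else` branch (no key yet, no keyword) Python stores the bare string as the dict
-- value — not a list, hence not a value of the declared type; those inputs are excluded by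
-- Pre_ below, and the port boxes it as a singleton list there.  `organized_data[key].append`
-- is ported with Dict.modify (the key is always present when `key` is set).
def pvStepA (st : PySem.Dict String (List String) × Int × Option String × List Char)
    (letter : Char) : PySem.Dict String (List String) × Int × Option String × List Char :=
  match st with
  | (d, count, key, string) =>
    if letter == '\r' || letter == '\n' then
      let s := PySem.Chars.strip string
      if s.isEmpty then (d, count, key, [])
      else if pvValidKeys.any (fun v => PySem.Chars.isIn v s) then
        let k := String.ofList (PySem.Int.toChars count ++ ". ".toList ++ s)
        (d.insert k [], count + 1, some k, [])
      else
        match key with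
        | some k => (d.modify k [] (fun l => l ++ [String.ofList s]), count, some k, [])
        | none => (d.insert (String.ofList (PySem.Int.toChars count ++ ".".toList))
                     [String.ofList s], count + 1, none, [])
    else if letter == '\'' then (d, count, key, string)
    else (d, count, key, string ++ [letter])

def requirement_dict (lines : String) : List (String × List String) :=
  match lines.toList.foldl pvStepA (PySem.Dict.empty, 1, none, []) with
  | (d, count, _, string) =>
    if (PySem.Chars.strip string).isEmpty then d.items
    else (d.insert (String.ofList (PySem.Int.toChars count ++ ". ".toList ++ string)) []).items

-- ===== PORT B =====
-- B's is_header helper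
def pvHeaderB (s : List Char) : Bool := pvValidKeys.any (fun v => PySem.Chars.isIn v s)

-- B's inner while loop: collect the run of non-header segments, return it with the remainder
def pvCollect (body : List (List Char)) : List String × List (List Char) :=
  match body with
  | [] => ([], [])
  | s :: t =>
    if pvHeaderB s then ([], s :: t)
    else
      let r := pvCollect t
      (String.ofList s :: r.1, r.2)

-- termination measure for pvHeaders (cited in its decreasing_by)
lemma pvCollect_len (body : List (List Char)) : (pvCollect body).2.length ≤ body.length := by
  induction body with
  | nil => simp [pvCollect]
  | cons s t ih => simp only [pvCollect]; split_ifs <;> simp <;> omega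

-- B's first while loop: leading non-header segments become standalone numbered entries.
-- Python stores the bare string there (outside the declared type, excluded by Pre_ below);
-- the port boxes it as a singleton list.
def pvLeading (d : PySem.Dict String (List String)) (count : Int) (body : List (List Char)) :
    PySem.Dict String (List String) × Int × List (List Char) :=
  match body with
  | [] => (d, count, [])
  | s :: t =>
    if pvHeaderB s then (d, count, s :: t)
    else pvLeading (d.insert (String.ofList (PySem.Int.toChars count ++ ".".toList))
                      [String.ofList s]) (count + 1) t

-- B's second while loop: each header takes the collected run of courses after it
def pvHeaders (d : PySem.Dict String (List String)) (count : Int) (body : List (List Char)) :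
    PySem.Dict String (List String) × Int :=
  match body with
  | [] => (d, count)
  | s :: t =>
    pvHeaders (d.insert (String.ofList (PySem.Int.toChars count ++ ". ".toList ++ s))
        (pvCollect t).1) (count + 1) (pvCollect t).2
termination_by body.length
decreasing_by simpa using Nat.lt_succ_of_le (pvCollect_len t)

-- segments[-1] is ported with getLastD: str.split always yields a nonempty list.
def requirement_dict_alt (lines : String) : List (String × List String) :=
  let segments := PySem.Chars.splitOn
    (PySem.Chars.replace (PySem.Chars.replace lines.toList ['\''] []) ['\r'] ['\n']) ['\n']
  let body := (segments.dropLast.map PySem.Chars.strip).filter (fun s => !s.isEmpty)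
  let st := pvLeading PySem.Dict.empty 1 body
  let fin := pvHeaders st.1 st.2.1 st.2.2
  let last := segments.getLastD []
  if (PySem.Chars.strip last).isEmpty then fin.1.items
  else (fin.1.insert (String.ofList (PySem.Int.toChars fin.2 ++ ". ".toList ++ last)) []).items

-- ===== PRECONDITION & SPEC =====
-- Pre_ excludes exactly the inputs on which the Python A stores a bare string (not a list) as a
-- dict value — a value outside the declared type List (String × List String): that happens iff,
-- among the terminator-ended lines (apostrophes removed), the first one that is nonempty after
-- strip() contains no valid header keyword.
def Pre_requirement_dict (lines : String) : Prop :=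
  (((PySem.Chars.splitOn
      (PySem.Chars.replace (PySem.Chars.replace lines.toList ['\''] []) ['\r'] ['\n'])
      ['\n']).dropLast.find? (fun seg => !(PySem.Chars.strip seg).isEmpty)).all
    (fun seg => pvValidKeys.any (fun v => PySem.Chars.isIn v (PySem.Chars.strip seg)))) = true
instance (lines : String) : Decidable (Pre_requirement_dict lines) := by
  unfold Pre_requirement_dict; infer_instance

def pvWitness_requirement_dict : String := "One of MATH 135\nMATH 136\n CS 101 "

def Spec_requirement_dict (lines : String) (out : List (String × List String)) : Prop :=
  out = requirement_dict_alt lines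
instance (lines : String) (out : List (String × List String)) :
    Decidable (Spec_requirement_dict lines out) := by unfold Spec_requirement_dict; infer_instance

-- ===== CLAIM (what is proved, stated in full; the proofs are below) =====
def Claim_equal_requirement_dict : Prop := ∀ (lines : String), Dom_requirement_dict lines →
  Pre_requirement_dict lines → Spec_requirement_dict lines (requirement_dict lines)

-- ===== LEMMAS AND PROOFS =====

-- s.replace(a, r) for a single-char pattern, as a structural recursion
def pvRepl (a : Char) (r : List Char) : List Char → List Char
  | [] => []
  | c :: t => if c = a then r ++ pvRepl a r t else c :: pvRepl a r t

-- s.split(a) for a single-char separator, as a structural recursion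
def pvSplit (a : Char) : List Char → List (List Char)
  | [] => [[]]
  | c :: t =>
    if c = a then [] :: pvSplit a t
    else
      match pvSplit a t with
      | [] => [[c]]
      | h :: rest => (c :: h) :: rest

def pvConsHead (pre : List Char) : List (List Char) → List (List Char)
  | [] => [pre]
  | h :: t => (pre ++ h) :: t

lemma pvSplit_ne_nil (a : Char) (l : List Char) : pvSplit a l ≠ [] := by
  cases l with
  | nil => simp [pvSplit]
  | cons c t =>
    simp only [pvSplit]
    split_ifs
    · simp
    · cases h : pvSplit a t <;> simp

lemma pvReplGo_single (a : Char) (r : List Char) :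
    ∀ (l : List Char) (fuel : Nat) (acc : List Char), l.length ≤ fuel →
      PySem.Chars.replace.go [a] r fuel l acc = acc.reverse ++ pvRepl a r l := by
  intro l
  induction l with
  | nil => intro fuel acc _; cases fuel <;> simp [PySem.Chars.replace.go, pvRepl]
  | cons c t ih =>
    intro fuel acc h
    cases fuel with
    | zero => simp at h
    | succ n =>
      simp only [PySem.Chars.replace.go]
      by_cases hc : a = c
      · subst hc
        have hpre : [a].isPrefixOf (a :: t) = true := by simp [List.isPrefixOf]
        rw [hpre, if_pos rfl]
        have hdrop : List.drop [a].length (a :: t) = t := rfl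
        rw [hdrop, ih n (r.reverse ++ acc) (by simpa using h)]
        simp [pvRepl]
      · have hpre : [a].isPrefixOf (c :: t) = false := by simp [List.isPrefixOf, hc]
        rw [hpre]
        simp only [Bool.false_eq_true, if_false]
        rw [ih n (c :: acc) (by simpa using Nat.le_of_succ_le_succ h)]
        have hca : ¬ c = a := fun hd => hc hd.symm
        simp [pvRepl, hca]

lemma pvReplace_single (cs : List Char) (a : Char) (r : List Char) :
    PySem.Chars.replace cs [a] r = pvRepl a r cs := by
  simp only [PySem.Chars.replace, List.isEmpty_cons, Bool.false_eq_true, if_false]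
  simpa using pvReplGo_single a r cs cs.length [] le_rfl

lemma pvSplitGo_single (a : Char) :
    ∀ (l : List Char) (fuel : Nat) (cur : List Char) (acc : List (List Char)), l.length ≤ fuel →
      PySem.Chars.splitOn.go [a] fuel l cur acc
        = acc.reverse ++ pvConsHead cur.reverse (pvSplit a l) := by
  intro l
  induction l with
  | nil => intro fuel cur acc _; cases fuel <;> simp [PySem.Chars.splitOn.go, pvSplit, pvConsHead]
  | cons c t ih =>
    intro fuel cur acc h
    cases fuel with
    | zero => simp at h
    | succ n =>
      simp only [PySem.Chars.splitOn.go]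
      by_cases hc : a = c
      · subst hc
        have hpre : [a].isPrefixOf (a :: t) = true := by simp [List.isPrefixOf]
        rw [hpre, if_pos rfl]
        have hdrop : List.drop [a].length (a :: t) = t := rfl
        rw [hdrop, ih n [] (cur.reverse :: acc) (by simpa using h)]
        have := pvSplit_ne_nil a t
        cases hs : pvSplit a t with
        | nil => exact absurd hs this
        | cons h1 rest => simp [pvSplit, pvConsHead, hs]
      · have hpre : [a].isPrefixOf (c :: t) = false := by simp [List.isPrefixOf, hc]
        rw [hpre]
        simp only [Bool.false_eq_true, if_false]
        rw [ih n (c :: cur) acc (by simpa using Nat.le_of_succ_le_succ h)]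
        have hne : ¬ (c = a) := fun hd => hc hd.symm
        have := pvSplit_ne_nil a t
        cases hs : pvSplit a t with
        | nil => exact absurd hs this
        | cons h1 rest => simp [pvSplit, hne, pvConsHead, hs]

lemma pvSplitOn_single (cs : List Char) (a : Char) :
    PySem.Chars.splitOn cs [a] = pvSplit a cs := by
  simp only [PySem.Chars.splitOn]
  rw [pvSplitGo_single a cs (cs.length + 1) [] [] (Nat.le_succ _)]
  have := pvSplit_ne_nil a cs
  cases hs : pvSplit a cs with
  | nil => exact absurd hs this
  | cons h rest => simp [pvConsHead]

-- the composed preprocessing: drop apostrophes, then map '\r' to '\n'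
def pvClean : List Char → List Char
  | [] => []
  | c :: t => if c = '\'' then pvClean t else (if c = '\r' then '\n' else c) :: pvClean t

lemma pvClean_eq (cs : List Char) :
    pvRepl '\r' ['\n'] (pvRepl '\'' [] cs) = pvClean cs := by
  induction cs with
  | nil => rfl
  | cons c t ih =>
    by_cases h1 : c = '\''
    · simp [pvRepl, pvClean, h1, ih]
    · by_cases h2 : c = '\r' <;> simp [pvRepl, pvClean, h1, h2, ih]

-- A's per-terminated-line action, extracted: what one '\n' step of A does to (dict, count, key)
def pvStepB (st : PySem.Dict String (List String) × Int × Option String)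
    (segment : List Char) : PySem.Dict String (List String) × Int × Option String :=
  match st with
  | (d, count, key) =>
    let stripped := PySem.Chars.strip segment
    if stripped.isEmpty then (d, count, key)
    else if pvValidKeys.any (fun v => PySem.Chars.isIn v stripped) then
      let k := String.ofList (PySem.Int.toChars count ++ ". ".toList ++ stripped)
      (d.insert k [], count + 1, some k)
    else
      match key with
      | some k => (d.modify k [] (fun l => l ++ [String.ofList stripped]), count, some k)
      | none => (d.insert (String.ofList (PySem.Int.toChars count ++ ".".toList))
                   [String.ofList stripped], count + 1, none)

-- finalization shared by both runs: the trailing `if string.strip():` branch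
def pvFin (st : PySem.Dict String (List String) × Int × Option String)
    (last : List Char) : List (String × List String) :=
  match st with
  | (d, count, _) =>
    if (PySem.Chars.strip last).isEmpty then d.items
    else (d.insert (String.ofList (PySem.Int.toChars count ++ ". ".toList ++ last)) []).items

-- A's whole computation as a run over segments
def pvRunB (st : PySem.Dict String (List String) × Int × Option String) :
    List (List Char) → List (String × List String)
  | [] => pvFin st []
  | [last] => pvFin st last
  | seg :: s2 :: rest => pvRunB (pvStepB st seg) (s2 :: rest)

lemma pvRunB_eq_foldl (segs : List (List Char))
    (st : PySem.Dict String (List String) × Int × Option String) (h : segs ≠ []) :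
    pvRunB st segs = pvFin (segs.dropLast.foldl pvStepB st) (segs.getLastD []) := by
  induction segs generalizing st with
  | nil => exact absurd rfl h
  | cons seg rest ih =>
    cases rest with
    | nil => simp [pvRunB, pvFin]
    | cons s2 rest' =>
      rw [show pvRunB st (seg :: s2 :: rest') = pvRunB (pvStepB st seg) (s2 :: rest') from rfl,
        ih (pvStepB st seg) (by simp)]
      simp [List.dropLast_cons_of_ne_nil]

-- one terminator step of A is one segment step on the accumulated string
lemma pvStepA_term (d : PySem.Dict String (List String)) (count : Int) (key : Option String)
    (string : List Char) (c : Char) (hc : c = '\r' ∨ c = '\n') :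
    pvStepA (d, count, key, string) c
      = (match pvStepB (d, count, key) string with
         | (d', count', key') => (d', count', key', ([] : List Char))) := by
  have hb : (c == '\r' || c == '\n') = true := by
    rcases hc with h | h <;> simp [h]
  simp only [pvStepA, pvStepB, hb, if_pos]
  split_ifs <;> first | rfl | (cases key <;> rfl)

-- A's character loop followed by its trailing branch equals the segment run
lemma pvRunA_eq (cs : List Char) :
    ∀ (d : PySem.Dict String (List String)) (count : Int) (key : Option String)
      (acc : List Char),
      (match cs.foldl pvStepA (d, count, key, acc) with
       | (d', count', _, string) => pvFin (d', count', none) string)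
        = pvRunB (d, count, key) (pvConsHead acc (pvSplit '\n' (pvClean cs))) := by
  induction cs with
  | nil =>
    intro d count key acc
    simp [pvClean, pvSplit, pvConsHead, pvRunB, pvFin]
  | cons c t ih =>
    intro d count key acc
    rw [List.foldl_cons]
    by_cases h1 : c = '\''
    · have : pvStepA (d, count, key, acc) c = (d, count, key, acc) := by
        simp [pvStepA, h1]
      rw [this, ih]
      simp [pvClean, h1]
    · by_cases h2 : c = '\r' ∨ c = '\n'
      · rw [pvStepA_term d count key acc c h2]
        have hcl : pvClean (c :: t) = '\n' :: pvClean t := by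
          rcases h2 with h | h <;> subst h <;> simp [pvClean]
        rw [hcl]
        have hsp : pvSplit '\n' ('\n' :: pvClean t) = [] :: pvSplit '\n' (pvClean t) := by
          simp [pvSplit]
        rw [hsp]
        cases hst : pvStepB (d, count, key) acc with
        | mk d' rest =>
          cases rest with
          | mk count' key' =>
            rw [ih d' count' key' []]
            have hne := pvSplit_ne_nil '\n' (pvClean t)
            cases hs : pvSplit '\n' (pvClean t) with
            | nil => exact absurd hs hne
            | cons h0 r0 => simp [pvConsHead, pvRunB, hst]
      · rw [not_or] at h2
        have hb : (c == '\r' || c == '\n') = false := by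
          simp [h2.1, h2.2]
        have : pvStepA (d, count, key, acc) c = (d, count, key, acc ++ [c]) := by
          simp [pvStepA, hb, h1]
        rw [this, ih]
        have hcl : pvClean (c :: t) = c :: pvClean t := by simp [pvClean, h1, h2.1]
        rw [hcl]
        have hcn : ¬ (c = '\n') := h2.2
        have hne := pvSplit_ne_nil '\n' (pvClean t)
        cases hs : pvSplit '\n' (pvClean t) with
        | nil => exact absurd hs hne
        | cons h0 r0 => simp [pvSplit, hcn, hs, pvConsHead]

-- strip is idempotent (strip = rdropWhile ∘ dropWhile on isspace)
lemma pvStrip_idem (s : List Char) :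
    PySem.Chars.strip (PySem.Chars.strip s) = PySem.Chars.strip s := by
  have hr : ∀ l : List Char, PySem.Chars.rstrip l = List.rdropWhile PySem.Chars.isspace l := by
    intro l; simp [PySem.Chars.rstrip, List.rdropWhile]
  simp only [PySem.Chars.strip, PySem.Chars.lstrip, hr]
  set p := PySem.Chars.isspace
  set X := List.dropWhile p s with hX
  have h1 : List.dropWhile p (List.rdropWhile p X) = List.rdropWhile p X := by
    rw [List.dropWhile_eq_self_iff]
    intro h
    have hpre := List.rdropWhile_prefix p X
    have hlen : 0 < X.length := lt_of_lt_of_le h hpre.length_le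
    have hg : (List.rdropWhile p X)[0] = X[0] := hpre.getElem h
    rw [hg]
    have hXne : X ≠ [] := List.ne_nil_of_length_pos hlen
    have hhead := List.head_dropWhile_not (l := s) p (by rwa [hX] at hXne)
    rw [← List.head_eq_getElem]
    simp only [Bool.not_eq_true]
    exact hhead
  rw [h1, List.rdropWhile_idempotent]

-- modify right after insert at the same key is a single insert
lemma pvModifyInsert (d : PySem.Dict String (List String)) (k : String) (v : List String)
    (f : List String → List String) : (d.insert k v).modify k [] f = d.insert k (f v) := by
  simp [PySem.Dict.modify, PySem.Dict.getD_insert_self, PySem.Dict.insert_insert_self]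

-- the stripped nonempty body segments
def pvBody (segs : List (List Char)) : List (List Char) :=
  (segs.map PySem.Chars.strip).filter (fun s => !s.isEmpty)

lemma pvBody_clean (segs : List (List Char)) :
    ∀ s ∈ pvBody segs, PySem.Chars.strip s = s ∧ s.isEmpty = false := by
  intro s hs
  simp only [pvBody, List.mem_filter, List.mem_map] at hs
  obtain ⟨⟨seg, _, rfl⟩, hne⟩ := hs
  exact ⟨pvStrip_idem seg, by simpa using hne⟩

-- the A-shaped fold over raw segments only sees their stripped nonempty forms
lemma pvFoldB_body (segs : List (List Char))
    (st : PySem.Dict String (List String) × Int × Option String) :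
    segs.foldl pvStepB st = (pvBody segs).foldl pvStepB st := by
  induction segs generalizing st with
  | nil => rfl
  | cons seg t ih =>
    by_cases he : (PySem.Chars.strip seg).isEmpty
    · have hskip : pvStepB st seg = st := by
        obtain ⟨d, count, key⟩ := st
        simp [pvStepB, he]
      rw [List.foldl_cons, hskip, ih]
      simp [pvBody, he]
    · have hsame : pvStepB st seg = pvStepB st (PySem.Chars.strip seg) := by
        obtain ⟨d, count, key⟩ := st
        simp only [pvStepB, pvStrip_idem]
      rw [List.foldl_cons, hsame, ih]
      have : pvBody (seg :: t) = PySem.Chars.strip seg :: pvBody t := by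
        simp [pvBody, he]
      rw [this, List.foldl_cons]

-- once a key is set, the A-shaped fold over clean segments is B's header grouping
lemma pvFoldB_headers (body : List (List Char))
    (hcl : ∀ s ∈ body, PySem.Chars.strip s = s ∧ s.isEmpty = false) :
    ∀ (d : PySem.Dict String (List String)) (count : Int) (k : String) (cs : List String),
      ((body.foldl pvStepB (d.insert k cs, count, some k)).1,
       (body.foldl pvStepB (d.insert k cs, count, some k)).2.1)
        = pvHeaders (d.insert k (cs ++ (pvCollect body).1)) count (pvCollect body).2 := by
  induction body with
  | nil => intro d count k cs; simp [pvCollect, pvHeaders]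
  | cons s t ih =>
    intro d count k cs
    obtain ⟨hstrip, hne⟩ := hcl s (by simp)
    have hcl' : ∀ x ∈ t, PySem.Chars.strip x = x ∧ x.isEmpty = false :=
      fun x hx => hcl x (by simp [hx])
    rw [List.foldl_cons]
    by_cases hh : pvHeaderB s = true
    · have hstep : pvStepB (d.insert k cs, count, some k) s
          = ((d.insert k cs).insert
              (String.ofList (PySem.Int.toChars count ++ ". ".toList ++ s)) [], count + 1,
             some (String.ofList (PySem.Int.toChars count ++ ". ".toList ++ s))) := by
        simp only [pvStepB, hstrip, hne, Bool.false_eq_true, if_false]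
        rw [if_pos (by simpa [pvHeaderB] using hh)]
      rw [hstep]
      have := ih hcl' (d.insert k cs) (count + 1)
        (String.ofList (PySem.Int.toChars count ++ ". ".toList ++ s)) []
      rw [show ([] : List String) ++ (pvCollect t).1 = (pvCollect t).1 from rfl] at this
      rw [this]
      simp only [pvCollect, hh, if_pos]
      rw [pvHeaders]
      simp
    · have hstep : pvStepB (d.insert k cs, count, some k) s
          = (d.insert k (cs ++ [String.ofList s]), count, some k) := by
        simp only [pvStepB, hstrip, hne, Bool.false_eq_true, if_false]
        rw [if_neg (by simpa [pvHeaderB] using hh)]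
        rw [pvModifyInsert]
      rw [hstep, ih hcl' d count k (cs ++ [String.ofList s])]
      simp only [pvCollect, hh, Bool.false_eq_true, if_false]
      simp [List.append_assoc]

-- under Pre_, the body is empty or starts with a header segment
lemma pvBody_head (segs : List (List Char))
    (hpre : ((segs.find? (fun seg => !(PySem.Chars.strip seg).isEmpty)).all
      (fun seg => pvValidKeys.any
        (fun v => PySem.Chars.isIn v (PySem.Chars.strip seg)))) = true) :
    pvBody segs = [] ∨ ∃ s t, pvBody segs = s :: t ∧ pvHeaderB s = true := by
  induction segs with
  | nil => left; rfl
  | cons seg t ih =>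
    by_cases he : (PySem.Chars.strip seg).isEmpty
    · have h1 : pvBody (seg :: t) = pvBody t := by simp [pvBody, he]
      have h2 : (seg :: t).find? (fun seg => !(PySem.Chars.strip seg).isEmpty)
          = t.find? (fun seg => !(PySem.Chars.strip seg).isEmpty) := by
        rw [List.find?_cons_of_neg]; simp [he]
      rw [h1]; exact ih (by rwa [h2] at hpre)
    · have h2 : (seg :: t).find? (fun seg => !(PySem.Chars.strip seg).isEmpty) = some seg := by
        rw [List.find?_cons_of_pos]; simp [he]
      rw [h2] at hpre
      right
      exact ⟨PySem.Chars.strip seg, pvBody t, by simp [pvBody, he],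
        by simpa [pvHeaderB] using hpre⟩

-- ===== VERDICT (by name: the statement is the Claim_ definition above) =====
theorem requirement_dict_spec : Claim_equal_requirement_dict := by
  intro lines _ hpre
  unfold Spec_requirement_dict
  unfold Pre_requirement_dict at hpre
  rw [pvReplace_single, pvReplace_single, pvClean_eq, pvSplitOn_single] at hpre
  -- A as a segment run
  have ha : requirement_dict lines
      = pvFin ((pvSplit '\n' (pvClean lines.toList)).dropLast.foldl pvStepB
          (PySem.Dict.empty, 1, none))
          ((pvSplit '\n' (pvClean lines.toList)).getLastD []) := by
    have h1 : requirement_dict lines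
        = pvRunB (PySem.Dict.empty, 1, none)
            (pvConsHead [] (pvSplit '\n' (pvClean lines.toList))) := by
      rw [← pvRunA_eq]
      unfold requirement_dict
      cases hA : List.foldl pvStepA (PySem.Dict.empty, 1, none, []) lines.toList with
      | mk d rest =>
        cases rest with
        | mk count rest2 =>
          cases rest2 with
          | mk key string => simp [pvFin]
    have h2 : pvConsHead [] (pvSplit '\n' (pvClean lines.toList))
        = pvSplit '\n' (pvClean lines.toList) := by
      cases hs : pvSplit '\n' (pvClean lines.toList) with
      | nil => exact absurd hs (pvSplit_ne_nil _ _)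
      | cons h0 r0 => simp [pvConsHead]
    rw [h1, h2, pvRunB_eq_foldl _ _ (pvSplit_ne_nil _ _)]
  -- B in the same shape
  have hb : requirement_dict_alt lines
      = (let fin := pvHeaders (pvLeading PySem.Dict.empty 1
            (pvBody (pvSplit '\n' (pvClean lines.toList)).dropLast)).1
            (pvLeading PySem.Dict.empty 1
              (pvBody (pvSplit '\n' (pvClean lines.toList)).dropLast)).2.1
            (pvLeading PySem.Dict.empty 1
              (pvBody (pvSplit '\n' (pvClean lines.toList)).dropLast)).2.2
         pvFin (fin.1, fin.2, none) ((pvSplit '\n' (pvClean lines.toList)).getLastD [])) := by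
    unfold requirement_dict_alt
    rw [pvReplace_single, pvReplace_single, pvClean_eq, pvSplitOn_single]
    rfl
  rw [ha, hb, pvFoldB_body]
  rcases pvBody_head _ hpre with hnil | ⟨s, t, hcons, hh⟩
  · rw [hnil]
    simp only [pvLeading, pvHeaders, List.foldl_nil]
  · rw [hcons]
    obtain ⟨hstrip, hne⟩ := pvBody_clean _ s (hcons ▸ List.mem_cons_self ..)
    have hcl' : ∀ x ∈ t, PySem.Chars.strip x = x ∧ x.isEmpty = false := by
      intro x hx
      exact pvBody_clean _ x (hcons ▸ List.mem_cons_of_mem _ hx)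
    rw [List.foldl_cons]
    have hstep : pvStepB (PySem.Dict.empty, 1, none) s
        = (PySem.Dict.empty.insert
            (String.ofList (PySem.Int.toChars 1 ++ ". ".toList ++ s)) [], 1 + 1,
           some (String.ofList (PySem.Int.toChars 1 ++ ". ".toList ++ s))) := by
      simp only [pvStepB, hstrip, hne, Bool.false_eq_true, if_false]
      rw [if_pos (by simpa [pvHeaderB] using hh)]
    rw [hstep]
    have hM := pvFoldB_headers t hcl' PySem.Dict.empty (1 + 1)
      (String.ofList (PySem.Int.toChars 1 ++ ". ".toList ++ s)) []
    rw [show ([] : List String) ++ (pvCollect t).1 = (pvCollect t).1 from rfl] at hM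
    have hL : pvLeading PySem.Dict.empty 1 (s :: t) = (PySem.Dict.empty, 1, s :: t) := by
      simp [pvLeading, hh]
    rw [hL]
    rw [show pvHeaders PySem.Dict.empty 1 (s :: t)
        = pvHeaders (PySem.Dict.empty.insert
            (String.ofList (PySem.Int.toChars 1 ++ ". ".toList ++ s)) (pvCollect t).1)
            (1 + 1) (pvCollect t).2 from by rw [pvHeaders]]
    cases hF : List.foldl pvStepB (PySem.Dict.empty.insert
        (String.ofList (PySem.Int.toChars 1 ++ ". ".toList ++ s)) [], 1 + 1,
        some (String.ofList (PySem.Int.toChars 1 ++ ". ".toList ++ s))) t with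
    | mk dF rest =>
      cases rest with
      | mk cF kF =>
        rw [hF] at hM
        simp only at hM
        rw [← hM]
        rfl
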